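-- pv_equiv track=rewrite | github.com/SayanDevX/pcall | lab/python/assignment4/7super.py | is_super
-- ===== SOURCE A (Python) =====
-- def is_super(k):
--     if k == 1:
--         return True
--     if k <= 0:
--         return False
--     if k % 2 == 0:
--         return is_super(k // 2)
--     if k % 3 == 0:
--         return is_super(k // 3)
--     return False
-- ===== SOURCE B (Python) =====
-- def is_super(k):
--     if k <= 0:
--         return False
--     while k % 2 == 0:
--         k //= 2
--     while k % 3 == 0:
--         k //= 3
--     return k == 1
-- ===== Notes on version B (the rewrite author's own statement) =====
-- stated objective: idiomatic
-- what changed: Replaces the interleaved branching recursion with an iterative version: strip all factors of 2, then all factors of 3, then test whether the residue is 1.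
import Mathlib
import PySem

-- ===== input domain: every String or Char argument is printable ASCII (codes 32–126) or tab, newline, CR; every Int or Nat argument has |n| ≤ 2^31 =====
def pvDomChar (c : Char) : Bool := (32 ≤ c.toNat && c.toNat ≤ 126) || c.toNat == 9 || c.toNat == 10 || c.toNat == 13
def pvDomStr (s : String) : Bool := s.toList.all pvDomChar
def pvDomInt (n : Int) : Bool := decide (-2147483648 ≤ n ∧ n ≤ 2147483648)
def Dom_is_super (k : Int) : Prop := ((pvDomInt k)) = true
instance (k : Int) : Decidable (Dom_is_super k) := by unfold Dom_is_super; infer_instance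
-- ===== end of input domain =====

-- ===== PORT A =====
-- literal port of A's recursion (PySem floor-division/mod; terminates since k shrinks while positive)
def is_super (k : Int) : Bool :=
  if k == 1 then true
  else if k ≤ 0 then false
  else if PySem.Int.mod k 2 == 0 then is_super (PySem.Int.floordiv k 2)
  else if PySem.Int.mod k 3 == 0 then is_super (PySem.Int.floordiv k 3)
  else false
termination_by k.toNat
decreasing_by
  · rw [PySem.Int.floordiv_eq_ediv_of_pos (by omega)]; omega
  · rw [PySem.Int.floordiv_eq_ediv_of_pos (by omega)]; omega

-- ===== PORT B =====
-- B's while loop "while k % p == 0: k //= p", run on the positive residue as a Nat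
def stripN (p n : Nat) : Nat :=
  if h : 2 ≤ p ∧ 0 < n ∧ n % p = 0 then stripN p (n / p) else n
termination_by n
decreasing_by exact Nat.div_lt_self h.2.1 (by omega)

-- B: guard non-positive k, strip all 2s then all 3s, test residue = 1
def is_super_alt (k : Int) : Bool :=
  if k ≤ 0 then false
  else decide (stripN 3 (stripN 2 k.toNat) = 1)

-- ===== PRECONDITION & SPEC =====
def Spec_is_super (k : Int) (out : Bool) : Prop := out = is_super_alt k
instance (k : Int) (out : Bool) : Decidable (Spec_is_super k out) := by unfold Spec_is_super; infer_instance

-- ===== CLAIM (what is proved, stated in full; the proofs are below) =====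
def Claim_equal_is_super : Prop := ∀ (k : Int), Dom_is_super k → Spec_is_super k (is_super k)

-- ===== LEMMAS AND PROOFS =====
theorem stripN_step (p n : Nat) (hp : 2 ≤ p) (hn : 0 < n) (hd : n % p = 0) :
    stripN p n = stripN p (n / p) := by
  rw [stripN]; simp [hp, hn, hd]

theorem stripN_stop (p n : Nat) (hd : n % p ≠ 0) : stripN p n = n := by
  rw [stripN]; simp [hd]

theorem is_super_nat (n : Nat) :
    is_super (n : Int) = (if n = 0 then false else decide (stripN 3 (stripN 2 n) = 1)) := by
  induction n using Nat.strong_induction_on with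
  | _ n ih =>
    rw [is_super]
    rcases Nat.eq_zero_or_pos n with h0 | hpos
    · subst h0; simp
    rcases Nat.lt_or_ge n 2 with h1 | h2
    · interval_cases n
      simp [stripN_stop 2 1 (by decide), stripN_stop 3 1 (by decide)]
    have hne1 : ((n : Int) == 1) = false := by
      simp; omega
    have hle : ¬ ((n : Int) ≤ 0) := by omega
    rw [hne1]; simp only [Bool.false_eq_true, if_false, hle, if_false]
    by_cases h2d : n % 2 = 0
    · have hm : (PySem.Int.mod (n : Int) 2 == 0) = true := by
        rw [PySem.Int.mod_eq_emod_of_pos (by omega)]; simp; omega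
      have hf : PySem.Int.floordiv (n : Int) 2 = ((n / 2 : Nat) : Int) := by
        rw [PySem.Int.floordiv_eq_ediv_of_pos (by omega)]; omega
      rw [hm, if_pos rfl, hf, ih (n / 2) (by omega)]
      rw [stripN_step 2 n (by omega) hpos h2d]
      have : n / 2 ≠ 0 := by omega
      simp [this]
      exact fun _ => by omega
    · have hm : (PySem.Int.mod (n : Int) 2 == 0) = false := by
        rw [PySem.Int.mod_eq_emod_of_pos (by omega)]; simp; omega
      rw [hm]; simp only [Bool.false_eq_true, if_false]
      rw [stripN_stop 2 n h2d]
      by_cases h3d : n % 3 = 0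
      · have hm3 : (PySem.Int.mod (n : Int) 3 == 0) = true := by
          rw [PySem.Int.mod_eq_emod_of_pos (by omega)]; simp; omega
        have hf3 : PySem.Int.floordiv (n : Int) 3 = ((n / 3 : Nat) : Int) := by
          rw [PySem.Int.floordiv_eq_ediv_of_pos (by omega)]; omega
        rw [hm3, if_pos rfl, hf3, ih (n / 3) (by omega)]
        have hodd3 : n / 3 % 2 ≠ 0 := by omega
        rw [stripN_stop 2 (n / 3) hodd3]
        rw [stripN_step 3 n (by omega) hpos h3d]
        have : n / 3 ≠ 0 := by omega
        simp [this]
        exact fun _ => by omega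
      · have hm3 : (PySem.Int.mod (n : Int) 3 == 0) = false := by
          rw [PySem.Int.mod_eq_emod_of_pos (by omega)]; simp; omega
        rw [hm3]; simp only [Bool.false_eq_true, if_false]
        rw [stripN_stop 3 n h3d]
        have : n ≠ 0 := by omega
        simp [this]; omega

-- ===== VERDICT (by name: the statement is the Claim_ definition above) =====
theorem is_super_spec : Claim_equal_is_super := by
  intro k _
  unfold Spec_is_super is_super_alt
  by_cases hk : k ≤ 0
  · rw [is_super]
    have h1 : (k == 1) = false := by simp; omega
    simp [h1, hk]
  · lift k to ℕ using (by omega : (0:Int) ≤ k) with n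
    have hn : n ≠ 0 := by omega
    rw [is_super_nat, if_neg hk, if_neg hn, Int.toNat_natCast]
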